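-- pv_equiv track=rewrite | github.com/Luckilyeee/TS-Counterfactual-Explanation-Bake-off | Wachter_TimeX_SG/mainAlibi.py | get_segmentsNumber
-- ===== SOURCE A (Python) =====
-- def get_segmentsNumber(l4):
--     flag, count = 0,0
--     for i in range(len(l4)):
--         if l4[i:i+1][0]!=0:
--             flag=1
--             flag=1
--         if flag==1 and l4[i:i+1][0]==0:
--             count= count+1
--             flag=0
--     return count
-- ===== SOURCE B (Python) =====
-- def get_segmentsNumber(l4):
--     # Run-compression: collapse the list into the sequence of its run labels
--     # (True = nonzero run, False = zero run), then count True->False adjacencies.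
--     labels = []
--     for x in l4:
--         lab = (x != 0)
--         if not labels or labels[-1] != lab:
--             labels.append(lab)
--     return sum(1 for a, b in zip(labels, labels[1:]) if a and not b)
-- ===== Notes on version B (the rewrite author's own statement) =====
-- stated objective: simpler
-- what changed: Replaces the flag state-machine that re-reads each element through a one-element slice with run-compression of the list into True/False run labels followed by counting adjacent True-to-False label pairs.
import Mathlib
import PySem

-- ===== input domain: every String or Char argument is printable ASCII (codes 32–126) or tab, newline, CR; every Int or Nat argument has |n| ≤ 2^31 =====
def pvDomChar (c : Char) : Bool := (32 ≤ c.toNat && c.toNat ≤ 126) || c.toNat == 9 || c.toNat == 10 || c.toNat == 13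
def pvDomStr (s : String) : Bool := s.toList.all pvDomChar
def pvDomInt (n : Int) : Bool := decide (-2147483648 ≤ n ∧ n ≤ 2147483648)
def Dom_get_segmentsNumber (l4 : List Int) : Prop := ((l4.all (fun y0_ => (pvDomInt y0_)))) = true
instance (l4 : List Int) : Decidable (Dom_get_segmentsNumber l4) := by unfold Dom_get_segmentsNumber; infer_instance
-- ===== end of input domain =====

-- B replaces A's flag state-machine with run-compression plus a count of True->False label adjacencies (objective: simpler).

-- ===== PORT A =====
def get_segmentsNumber (l4 : List Int) : Int :=
  -- for i in range(len(l4)): ... l4[i:i+1][0] ...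
  -- the [0] index is always in range for i of the loop, so the default of pyGetD is never used
  ((PySem.List.pyRange 0 (l4.length : Int) 1).foldl
    (fun (fc : Int × Int) i =>
      let x := PySem.List.pyGetD (PySem.List.slice l4 (some i) (some (i + 1))) 0 0
      let flag := if x ≠ 0 then 1 else fc.1
      if flag = 1 ∧ x = 0 then (0, fc.2 + 1) else (flag, fc.2))
    (0, 0)).2

-- ===== PORT B =====
def get_segmentsNumber_alt (l4 : List Int) : Int :=
  let labels := l4.foldl
    (fun (labels : List Bool) x =>
      let lab := decide (x ≠ 0)
      if labels = [] ∨ labels.getLast? ≠ some lab then labels ++ [lab] else labels) []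
  -- sum(1 for a, b in zip(labels, labels[1:]) if a and not b)
  ((labels.zip (PySem.List.slice labels (some 1) none)).countP (fun p => p.1 && !p.2) : Int)

-- ===== PRECONDITION & SPEC =====
def Spec_get_segmentsNumber (l4 : List Int) (out : Int) : Prop := out = get_segmentsNumber_alt l4
instance (l4 : List Int) (out : Int) : Decidable (Spec_get_segmentsNumber l4 out) := by unfold Spec_get_segmentsNumber; infer_instance

-- ===== CLAIM (what is proved, stated in full; the proofs are below) =====
def Claim_equal_get_segmentsNumber : Prop := ∀ (l4 : List Int), Dom_get_segmentsNumber l4 → Spec_get_segmentsNumber l4 (get_segmentsNumber l4)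

-- ===== LEMMAS AND PROOFS =====

-- number of nonzero-to-zero transitions of l, given whether the previous element was nonzero
def transA (b : Bool) : List Int → Nat
  | [] => 0
  | x :: xs => (if b ∧ x = 0 then 1 else 0) + transA (decide (x ≠ 0)) xs

-- run-compression continuation: labels of l with duplicates of the pending label b collapsed
def rcAux (b : Bool) : List Int → List Bool
  | [] => []
  | x :: xs => if decide (x ≠ 0) = b then rcAux b xs else decide (x ≠ 0) :: rcAux (decide (x ≠ 0)) xs

theorem lemA (l : List Int) (b : Bool) (c : Int) :
    (l.foldl (fun (fc : Int × Int) x =>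
      let flag := if x ≠ 0 then 1 else fc.1
      if flag = 1 ∧ x = 0 then (0, fc.2 + 1) else (flag, fc.2))
      ((if b then 1 else 0), c)).2 = c + (transA b l : Int) := by
  induction l generalizing b c with
  | nil => simp [transA]
  | cons x xs ih =>
    have hstep : (x :: xs).foldl (fun (fc : Int × Int) x =>
        let flag := if x ≠ 0 then 1 else fc.1
        if flag = 1 ∧ x = 0 then (0, fc.2 + 1) else (flag, fc.2))
        ((if b then 1 else 0), c)
      = xs.foldl (fun (fc : Int × Int) x =>
        let flag := if x ≠ 0 then 1 else fc.1
        if flag = 1 ∧ x = 0 then (0, fc.2 + 1) else (flag, fc.2))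
        ((if decide (x ≠ 0) then 1 else 0), c + (if b ∧ x = 0 then 1 else 0)) := by
      rw [List.foldl_cons]
      by_cases hx : x = 0 <;> cases b <;> norm_num [hx]
    rw [hstep, ih, transA]
    by_cases hx : x = 0 <;> cases b <;> norm_num [hx] <;> ring

theorem lemB_bridge (xs : List Int) (acc : List Bool) (b : Bool) (h : acc.getLast? = some b) :
    xs.foldl (fun (labels : List Bool) x =>
      let lab := decide (x ≠ 0)
      if labels = [] ∨ labels.getLast? ≠ some lab then labels ++ [lab] else labels) acc
    = acc ++ rcAux b xs := by
  induction xs generalizing acc b with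
  | nil => simp [rcAux]
  | cons x xs ih =>
    simp only [List.foldl_cons, rcAux]
    by_cases hl : decide (x ≠ 0) = b
    · have hacc : acc ≠ [] := by intro hh; simp [hh] at h
      have hcond : ¬ (acc = [] ∨ acc.getLast? ≠ some (decide (x ≠ 0))) := by
        rw [h, hl]; simp [hacc]
      rw [if_neg hcond, hl, ih acc b h, if_pos rfl]
    · have hcond : acc = [] ∨ acc.getLast? ≠ some (decide (x ≠ 0)) := by
        right; rw [h]; intro hc; exact hl (by injection hc with h'; exact h'.symm)
      rw [if_pos hcond, ih (acc ++ [decide (x ≠ 0)]) (decide (x ≠ 0)) (by simp),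
        if_neg hl, List.append_assoc, List.singleton_append]

theorem lemL (xs : List Int) (b : Bool) (r : List Bool) (hr : r = rcAux b xs) :
    ((b :: r).zip r).countP (fun p => p.1 && !p.2) = transA b xs := by
  induction xs generalizing b r with
  | nil => simp [rcAux, transA] at hr ⊢; simp [hr]
  | cons x xs ih =>
    simp only [rcAux, transA] at hr ⊢
    by_cases hl : decide (x ≠ 0) = b
    · rw [if_pos hl] at hr
      have hx : ¬ (b = true ∧ x = 0) := by
        rintro ⟨hb, hx0⟩; rw [hb] at hl; simp [hx0] at hl
      rw [if_neg hx, hl, ih b r hr]; omega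
    · rw [if_neg hl] at hr
      subst hr
      simp only [List.zip_cons_cons, List.countP_cons]
      rw [ih (decide (x ≠ 0)) _ rfl]
      by_cases hx : x = 0 <;> cases b <;> simp_all [Nat.add_comm]


-- ===== VERDICT (by name: the statement is the Claim_ definition above) =====
theorem get_segmentsNumber_spec : Claim_equal_get_segmentsNumber := by
  intro l4 _
  unfold Spec_get_segmentsNumber get_segmentsNumber get_segmentsNumber_alt
  -- A side: the slice-index body reads l4[i]
  have hbody : (PySem.List.pyRange 0 (l4.length : Int) 1).foldl
      (fun (fc : Int × Int) i =>
        let x := PySem.List.pyGetD (PySem.List.slice l4 (some i) (some (i + 1))) 0 0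
        let flag := if x ≠ 0 then 1 else fc.1
        if flag = 1 ∧ x = 0 then (0, fc.2 + 1) else (flag, fc.2)) (0, 0)
      = (PySem.List.pyRange 0 (l4.length : Int) 1).foldl
      (fun (fc : Int × Int) i =>
        let x := PySem.List.pyGetD l4 i 0
        let flag := if x ≠ 0 then 1 else fc.1
        if flag = 1 ∧ x = 0 then (0, fc.2 + 1) else (flag, fc.2)) (0, 0) := by
    apply PySem.List.foldl_congr_mem
    intro acc i hi
    have hb := (PySem.List.mem_pyRange_one).mp hi
    have h0 : 0 ≤ i := hb.1
    have h1 : i < (l4.length : Int) := hb.2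
    have hsl : PySem.List.slice l4 (some i) (some (i + 1))
        = (l4.drop i.toNat).take ((i + 1).toNat - i.toNat) :=
      PySem.List.slice_toNat l4 h0 (by omega)
    have ht : (i + 1).toNat - i.toNat = 1 := by omega
    have hget : PySem.List.pyGetD (PySem.List.slice l4 (some i) (some (i + 1))) 0 0
        = PySem.List.pyGetD l4 i 0 := by
      rw [hsl, ht, PySem.List.pyGetD_zero, PySem.List.pyGetD_eq_getElem l4 0 h0 h1]
      have hlen : i.toNat < l4.length := by omega
      simp [List.getD, hlen]
    rw [hget]
  rw [hbody, PySem.List.foldl_pyRange_zero_pyGetD' l4 0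
      (fun (fc : Int × Int) x =>
        let flag := if x ≠ 0 then 1 else fc.1
        if flag = 1 ∧ x = 0 then (0, fc.2 + 1) else (flag, fc.2)) (0, 0)]
  rw [show ((0 : Int), (0 : Int)) = ((if (false : Bool) then (1 : Int) else 0), (0 : Int)) from rfl,
    lemA l4 false 0]
  -- B side
  simp only [PySem.List.slice_from_one]
  cases l4 with
  | nil => simp [transA]
  | cons x xs =>
    rw [show (x :: xs).foldl (fun (labels : List Bool) x =>
        let lab := decide (x ≠ 0)
        if labels = [] ∨ labels.getLast? ≠ some lab then labels ++ [lab] else labels) []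
      = [decide (x ≠ 0)] ++ rcAux (decide (x ≠ 0)) xs by
        simp only [List.foldl_cons]
        rw [if_pos (by simp)]
        exact lemB_bridge xs [decide (x ≠ 0)] (decide (x ≠ 0)) (by simp)]
    simp only [List.singleton_append, List.tail_cons]
    rw [lemL xs (decide (x ≠ 0)) _ rfl]
    simp [transA]
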